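-- pv_equiv track=rewrite | github.com/210533141zby/new_velo | backend/app/services/llm_service.py | _remove_suffix_overlap
-- ===== SOURCE A (Python) =====
-- def _remove_suffix_overlap(text: str, suffix: str) -> str:
--     if not text or not suffix:
--         return text
--
--     safe_suffix = suffix.lstrip()
--     if not safe_suffix:
--         return text
--
--     max_overlap = min(len(text), len(safe_suffix))
--     for i in range(max_overlap, 0, -1):
--         if text[-i:] == safe_suffix[:i]:
--             return text[:-i]
--     return text
-- ===== SOURCE B (Python) =====
-- def _remove_suffix_overlap(text: str, suffix: str) -> str:
--     safe_suffix = suffix.lstrip()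
--     if not safe_suffix:
--         return text
--     # KMP failure function on safe_suffix + sentinel + text: the final value is the
--     # length of the longest prefix of safe_suffix that is a suffix of text.
--     comb = safe_suffix + "\x00" + text
--     fail = [0] * len(comb)
--     k = 0
--     for j in range(1, len(comb)):
--         c = comb[j]
--         while k > 0 and comb[k] != c:
--             k = fail[k - 1]
--         if comb[k] == c:
--             k += 1
--         fail[j] = k
--     return text[:len(text) - fail[-1]]
-- ===== Notes on version B (the rewrite author's own statement) =====
-- stated objective: faster
-- what changed: Replaced the descending brute-force scan comparing text[-i:] with safe_suffix[:i] for every i by a single KMP failure-function pass over safe_suffix + '\x00' + text whose final value is the overlap length.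
import Mathlib
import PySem

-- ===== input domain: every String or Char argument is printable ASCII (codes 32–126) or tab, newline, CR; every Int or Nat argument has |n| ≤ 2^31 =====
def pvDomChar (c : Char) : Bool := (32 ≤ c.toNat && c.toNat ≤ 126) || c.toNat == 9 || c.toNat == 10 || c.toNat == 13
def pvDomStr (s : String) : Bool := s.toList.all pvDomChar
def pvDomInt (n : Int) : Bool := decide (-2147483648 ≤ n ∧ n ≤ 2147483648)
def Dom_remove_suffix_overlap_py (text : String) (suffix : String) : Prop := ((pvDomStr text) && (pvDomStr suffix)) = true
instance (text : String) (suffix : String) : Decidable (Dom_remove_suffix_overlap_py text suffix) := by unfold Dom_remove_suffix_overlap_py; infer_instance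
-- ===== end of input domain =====

-- B replaces A's descending brute-force scan (compare text[-i:] with safe_suffix[:i] for every i)
-- by a single KMP failure-function pass over safe_suffix + '\x00' + text (objective: faster).

-- ===== PORT A =====
-- for i in range(max_overlap, 0, -1): if text[-i:] == safe_suffix[:i]: return text[:-i]
def pvALoop (text : String) (safe : String) : List Int → String
  | [] => text
  | i :: rest =>
      if PySem.Str.slice text (some (-i)) none = PySem.Str.slice safe none (some i) then
        PySem.Str.slice text none (some (-i))
      else pvALoop text safe rest

def remove_suffix_overlap_py (text : String) (suffix : String) : String :=
  if text = "" ∨ suffix = "" then text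
  else
    let safe_suffix := PySem.Str.lstrip suffix
    if safe_suffix = "" then text
    else
      let max_overlap : Int := min (PySem.Str.len text) (PySem.Str.len safe_suffix)
      pvALoop text safe_suffix (PySem.List.pyRange max_overlap 0 (-1))

-- ===== PORT B =====
-- while k > 0 and comb[k] != c: k = fail[k-1]   (fuel = j ≥ k suffices: each step strictly decreases k)
def pvFall (comb : List Char) (fail : Array Nat) (c : Char) : Nat → Nat → Nat
  | 0, k => k
  | fuel + 1, k =>
      if 0 < k ∧ comb.getD k ' ' ≠ c then pvFall comb fail c fuel (fail.getD (k - 1) 0)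
      else k

-- one iteration of Source B's for-loop body: c = comb[j]; while …; if comb[k] == c: k += 1; fail[j] = k
-- (Source B assigns fail[j] = k for j = 1 .. len-1 in order into a zero-filled list; since fail[0]
--  stays 0 and entries beyond j are never read before being assigned, that is the push below)
def pvKmpStep (comb : List Char) (st : Array Nat × Nat) (j : Nat) : Array Nat × Nat :=
  let c := comb.getD j ' '
  let k := pvFall comb st.1 c j st.2
  let k := if comb.getD k ' ' = c then k + 1 else k
  (st.1.push k, k)

def remove_suffix_overlap_py_alt (text : String) (suffix : String) : String :=
  let safe_suffix := PySem.Str.lstrip suffix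
  if safe_suffix = "" then text
  else
    let comb := safe_suffix.toList ++ '\x00' :: text.toList
    let st := (List.range' 1 (comb.length - 1)).foldl (pvKmpStep comb) (#[0], 0)
    -- return text[:len(text) - fail[-1]]  (st.2 is the last value assigned, = fail[-1])
    PySem.Str.slice text none (some (PySem.Str.len text - (st.2 : Int)))

-- ===== PRECONDITION & SPEC =====
def Spec_remove_suffix_overlap_py (text : String) (suffix : String) (out : String) : Prop := out = remove_suffix_overlap_py_alt text suffix
instance (text : String) (suffix : String) (out : String) : Decidable (Spec_remove_suffix_overlap_py text suffix out) := by unfold Spec_remove_suffix_overlap_py; infer_instance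

-- ===== CLAIM (what is proved, stated in full; the proofs are below) =====
def Claim_equal_remove_suffix_overlap_py : Prop := ∀ (text : String) (suffix : String), Dom_remove_suffix_overlap_py text suffix → Spec_remove_suffix_overlap_py text suffix (remove_suffix_overlap_py text suffix)

-- ===== LEMMAS AND PROOFS =====

-- i is an overlap: the last i chars of tl are the first i chars of sl
abbrev pvMatch (tl sl : List Char) (i : Nat) : Prop := tl.drop (tl.length - i) = sl.take i

-- the largest overlap (0 always qualifies)
def pvOv (tl sl : List Char) : Nat := Nat.findGreatest (pvMatch tl sl) (min tl.length sl.length)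

-- b is a border of s: the first b chars equal the last b chars
abbrev pvIsB (s : List Char) (b : Nat) : Prop := s.take b = s.drop (s.length - b)

-- longest proper border
def pvBord (s : List Char) : Nat := Nat.findGreatest (pvIsB s) (s.length - 1)

lemma pvIsB_zero (s : List Char) : pvIsB s 0 := by simp [pvIsB]

lemma pvBord_isB (s : List Char) : pvIsB s (pvBord s) :=
  Nat.findGreatest_spec (Nat.zero_le _) (pvIsB_zero s)

lemma pvBord_le (s : List Char) : pvBord s ≤ s.length - 1 := Nat.findGreatest_le _

lemma pvLe_bord (s : List Char) (b : Nat) (hb : b ≤ s.length - 1) (h : pvIsB s b) :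
    b ≤ pvBord s := by
  by_contra hlt
  unfold pvBord at hlt
  exact Nat.findGreatest_is_greatest (by omega) hb h

lemma pvBord_eq_of (s : List Char) (v : Nat) (h1 : pvIsB s v) (hv : v ≤ s.length - 1)
    (h2 : ∀ b, b ≤ s.length - 1 → pvIsB s b → b ≤ v) : pvBord s = v :=
  le_antisymm (h2 _ (pvBord_le s) (pvBord_isB s)) (pvLe_bord s v hv h1)

-- border transitivity: a border a ≤ b of s is a border of s.take b
lemma pvIsB_take (s : List Char) (b a : Nat) (hb : pvIsB s b) (hbl : b ≤ s.length)
    (ha : a ≤ b) (haB : pvIsB s a) : pvIsB (s.take b) a := by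
  unfold pvIsB at *
  rw [List.take_take, min_eq_left ha, List.length_take, min_eq_left hbl, hb, List.drop_drop, haB]
  congr 1
  omega

lemma pvIsB_of_take (s : List Char) (b a : Nat) (hb : pvIsB s b) (hbl : b ≤ s.length)
    (ha : a ≤ b) (haB : pvIsB (s.take b) a) : pvIsB s a := by
  unfold pvIsB at *
  rw [List.take_take, min_eq_left ha, List.length_take, min_eq_left hbl, hb, List.drop_drop] at haB
  rw [haB]
  congr 1
  omega

-- extending a border by one character
lemma pvIsB_append (s : List Char) (c : Char) (b : Nat) (hb : b < s.length) :
    pvIsB (s ++ [c]) (b + 1) ↔ (pvIsB s b ∧ s.getD b ' ' = c) := by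
  unfold pvIsB
  have h1 : (s ++ [c]).take (b + 1) = s.take b ++ [s.getD b ' '] := by
    rw [List.take_append_of_le_length (by omega), List.take_add_one]
    congr 1
    simp [List.getElem?_eq_getElem hb]
  have h2 : (s ++ [c]).drop ((s ++ [c]).length - (b + 1)) = s.drop (s.length - b) ++ [c] := by
    rw [List.length_append]
    simp only [List.length_cons, List.length_nil]
    rw [show s.length + 1 - (b + 1) = s.length - b by omega,
      List.drop_append_of_le_length (by omega)]
  rw [h1, h2]
  constructor
  · intro h
    have := List.append_inj h (by simp [List.length_take, List.length_drop]; omega)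
    simpa using this
  · rintro ⟨h3, h4⟩
    rw [h3, h4]

-- ----- the KMP while-loop finds the largest matching border -----
lemma pvFall_spec (comb : List Char) (fail : Array Nat) (x : Char) (j : Nat)
    (hjlen : j ≤ comb.length)
    (hfail : ∀ i, i < j → fail.getD i 0 = pvBord (comb.take (i + 1))) :
    ∀ fuel k, k ≤ fuel → k < j → pvIsB (comb.take j) k →
      pvFall comb fail x fuel k ≤ k ∧
      pvFall comb fail x fuel k < j ∧
      pvIsB (comb.take j) (pvFall comb fail x fuel k) ∧
      (pvFall comb fail x fuel k = 0 ∨ comb.getD (pvFall comb fail x fuel k) ' ' = x) ∧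
      (∀ b, b ≤ k → pvIsB (comb.take j) b → comb.getD b ' ' = x →
        b ≤ pvFall comb fail x fuel k) := by
  intro fuel
  induction fuel with
  | zero =>
    intro k hk hkj hkB
    have hk0 : k = 0 := by omega
    subst hk0
    simp only [pvFall]
    exact ⟨le_refl _, hkj, hkB, by left; trivial, fun b hb _ _ => by omega⟩
  | succ fuel ih =>
    intro k hk hkj hkB
    simp only [pvFall]
    by_cases hcond : 0 < k ∧ comb.getD k ' ' ≠ x
    · rw [if_pos hcond]
      obtain ⟨hkpos, hne⟩ := hcond
      have hfk : fail.getD (k - 1) 0 = pvBord (comb.take k) := by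
        have h := hfail (k - 1) (by omega)
        rwa [show k - 1 + 1 = k by omega] at h
      have hplen : (comb.take j).length = j := by
        rw [List.length_take]; omega
      have htk : comb.take k = (comb.take j).take k := by
        rw [List.take_take, min_eq_left (le_of_lt hkj)]
      have hlenk : (comb.take k).length = k := by
        rw [List.length_take]; omega
      have hK'le : fail.getD (k - 1) 0 ≤ k - 1 := by
        rw [hfk]
        have h := pvBord_le (comb.take k)
        omega
      have hK'B : pvIsB (comb.take j) (fail.getD (k - 1) 0) := by
        apply pvIsB_of_take (comb.take j) k _ hkB (by omega) (by omega)
        rw [← htk, hfk]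
        exact pvBord_isB (comb.take k)
      obtain ⟨h1, h2, h3, h4, h5⟩ := ih (fail.getD (k - 1) 0) (by omega) (by omega) hK'B
      refine ⟨by omega, h2, h3, h4, ?_⟩
      intro b hb hbB hbx
      have hbk : b < k := by
        rcases Nat.lt_or_ge b k with h | h
        · exact h
        · exfalso
          have : b = k := by omega
          subst this
          exact hne hbx
      apply h5 b ?_ hbB hbx
      have hbtk : pvIsB (comb.take k) b := by
        have h := pvIsB_take (comb.take j) k b hkB (by omega) (by omega) hbB
        rwa [← htk] at h
      have h := pvLe_bord (comb.take k) b (by omega) hbtk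
      rw [hfk]
      exact h
    · rw [if_neg hcond]
      push Not at hcond
      refine ⟨le_refl _, hkj, hkB, ?_, fun b hb _ _ => hb⟩
      rcases Nat.eq_zero_or_pos k with h0 | hpos
      · exact Or.inl h0
      · exact Or.inr (hcond hpos)

-- the loop invariant of Source B's for-loop
def pvInv (comb : List Char) (j : Nat) (st : Array Nat × Nat) : Prop :=
  st.1.size = j ∧ (∀ i, i < j → st.1.getD i 0 = pvBord (comb.take (i + 1))) ∧
    st.2 = pvBord (comb.take j)

lemma pvKmpStep_inv (comb : List Char) (j : Nat) (st : Array Nat × Nat)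
    (hj1 : 1 ≤ j) (hj : j < comb.length) (hinv : pvInv comb j st) :
    pvInv comb (j + 1) (pvKmpStep comb st j) := by
  obtain ⟨hsize, hfail, hk⟩ := hinv
  set x := comb.getD j ' ' with hx
  have hplen : (comb.take j).length = j := by rw [List.length_take]; omega
  have hk0le : st.2 ≤ j - 1 := by
    rw [hk]
    have h := pvBord_le (comb.take j)
    omega
  have hkB : pvIsB (comb.take j) st.2 := hk ▸ pvBord_isB (comb.take j)
  obtain ⟨h1, h2, h3, h4, h5⟩ :=
    pvFall_spec comb st.1 x j (le_of_lt hj) hfail j st.2 (by omega) (by omega) hkB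
  set r := pvFall comb st.1 x j st.2 with hr
  have htake : comb.take (j + 1) = comb.take j ++ [x] := by
    rw [List.take_add_one]
    congr 1
    simp [List.getElem?_eq_getElem hj, hx]
  have hgetp : ∀ b, b < j → (comb.take j).getD b ' ' = comb.getD b ' ' := by
    intro b hb
    rw [List.getD_eq_getElem _ _ (by rw [hplen]; exact hb),
      List.getD_eq_getElem _ _ (by omega), List.getElem_take]
  set newk := if comb.getD r ' ' = x then r + 1 else r with hnew
  have hlen2 : (comb.take j ++ [x]).length = j + 1 := by
    simp [hplen]
  have hnewk : newk = pvBord (comb.take (j + 1)) := by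
    rw [htake]
    by_cases hrx : comb.getD r ' ' = x
    · rw [hnew, if_pos hrx]
      refine (pvBord_eq_of _ (r + 1) ?_ ?_ ?_).symm
      · rw [pvIsB_append _ _ _ (by rw [hplen]; exact h2)]
        exact ⟨h3, by rw [hgetp r h2]; exact hrx⟩
      · rw [hlen2]; omega
      · intro b hb hbB
        match b with
        | 0 => omega
        | b + 1 =>
          rw [hlen2] at hb
          rw [pvIsB_append _ _ _ (by rw [hplen]; omega)] at hbB
          obtain ⟨hbB', hbx⟩ := hbB
          have hbk : b ≤ st.2 := by
            have h := pvLe_bord (comb.take j) b (by rw [hplen]; omega) hbB'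
            rw [← hk] at h
            exact h
          have h := h5 b hbk hbB' (by rw [← hgetp b (by omega)]; exact hbx)
          omega
    · rw [hnew, if_neg hrx]
      have hr0 : r = 0 := by
        rcases h4 with h | h
        · exact h
        · exact absurd h hrx
      rw [hr0]
      refine (pvBord_eq_of _ 0 (pvIsB_zero _) (by omega) ?_).symm
      intro b hb hbB
      match b with
      | 0 => exact le_refl 0
      | b + 1 =>
        exfalso
        rw [hlen2] at hb
        rw [pvIsB_append _ _ _ (by rw [hplen]; omega)] at hbB
        obtain ⟨hbB', hbx⟩ := hbB
        have hbk : b ≤ st.2 := by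
          have h := pvLe_bord (comb.take j) b (by rw [hplen]; omega) hbB'
          rw [← hk] at h
          exact h
        have hble := h5 b hbk hbB' (by rw [← hgetp b (by omega)]; exact hbx)
        have hb0 : b = 0 := by omega
        subst hb0
        apply hrx
        rw [hr0, ← hgetp 0 (by omega)]
        exact hbx
  have hstep : pvKmpStep comb st j = (st.1.push newk, newk) := rfl
  rw [hstep]
  refine ⟨by simp [Array.size_push, hsize], ?_, hnewk⟩
  intro i hi
  by_cases hij : i < j
  · have hlt : i < st.1.size := by omega
    have hpp : (st.1.push newk).getD i 0 = st.1.getD i 0 := by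
      simp [Array.getD, hlt, Nat.lt_of_lt_of_le hlt (Nat.le_succ _), Array.getElem_push_lt]
    rw [hpp]
    exact hfail i hij
  · have hij' : i = j := by omega
    subst hij'
    have hpp : (st.1.push newk).getD i 0 = newk := by
      conv_lhs => rw [show i = st.1.size by omega]
      simp [Array.getD]
    rw [hpp]
    exact hnewk

lemma pvKmp_fold_aux (comb : List Char) :
    ∀ cnt j (st : Array Nat × Nat), 1 ≤ j → j + cnt ≤ comb.length → pvInv comb j st →
      pvInv comb (j + cnt) ((List.range' j cnt).foldl (pvKmpStep comb) st) := by
  intro cnt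
  induction cnt with
  | zero => intro j st _ _ h; simpa using h
  | succ cnt ih =>
    intro j st hj hlen hinv
    rw [List.range'_succ]
    simp only [List.foldl_cons]
    have h1 := pvKmpStep_inv comb j st hj (by omega) hinv
    have h2 := ih (j + 1) _ (by omega) (by omega) h1
    rw [show j + (cnt + 1) = (j + 1) + cnt by omega]
    exact h2

lemma pvKmp_fold (comb : List Char) (hL : 1 ≤ comb.length) :
    ((List.range' 1 (comb.length - 1)).foldl (pvKmpStep comb) (#[0], 0)).2 = pvBord comb := by
  have hb1 : (0 : Nat) = pvBord (comb.take 1) := by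
    unfold pvBord
    rw [show (comb.take 1).length - 1 = 0 by rw [List.length_take]; omega]
    exact (Nat.findGreatest_zero).symm
  have h0 : pvInv comb 1 (#[0], 0) := by
    refine ⟨rfl, ?_, hb1⟩
    intro i hi
    have hi0 : i = 0 := by omega
    subst hi0
    exact hb1
  have h := pvKmp_fold_aux comb (comb.length - 1) 1 (#[0], 0) (le_refl 1) (by omega) h0
  rw [show 1 + (comb.length - 1) = comb.length by omega] at h
  have h2 := h.2.2
  rwa [List.take_length] at h2

-- ----- characterization of port A -----
lemma pvALoop_eq (text safe : String) (M : Nat)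
    (hM : M ≤ min text.toList.length safe.toList.length) :
    pvALoop text safe (PySem.List.pyRange (M : Int) 0 (-1)) =
      String.ofList (text.toList.take
        (text.toList.length - Nat.findGreatest (pvMatch text.toList safe.toList) M)) := by
  induction M with
  | zero =>
    rw [Nat.cast_zero, PySem.List.pyRange_neg_one_eq_nil (le_refl 0)]
    simp only [pvALoop, Nat.findGreatest_zero, Nat.sub_zero, List.take_length]
    exact (String.ofList_toList).symm
  | succ M ihM =>
    have hlt : (0 : Int) < ((M + 1 : Nat) : Int) := by push_cast; omega
    rw [PySem.List.pyRange_neg_one_cons hlt]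
    simp only [pvALoop]
    rw [show (((M + 1 : Nat) : Int) - 1) = ((M : Nat) : Int) by push_cast; ring]
    have hcond : (PySem.Str.slice text (some (-((M + 1 : Nat) : Int))) none =
        PySem.Str.slice safe none (some ((M + 1 : Nat) : Int))) ↔
        pvMatch text.toList safe.toList (M + 1) := by
      rw [← String.toList_inj, PySem.Str.toList_slice, PySem.Str.toList_slice,
        PySem.Chars.slice_eq_listSlice, PySem.Chars.slice_eq_listSlice,
        PySem.List.slice_from_neg_natCast _ _ (by omega), PySem.List.slice_to_natCast]
    rw [Nat.findGreatest_succ]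
    by_cases hc : pvMatch text.toList safe.toList (M + 1)
    · rw [if_pos (hcond.mpr hc), if_pos hc]
      apply String.toList_inj.mp
      rw [PySem.Str.toList_slice, PySem.Chars.slice_eq_listSlice,
        PySem.List.slice_to_neg_natCast _ _ (by omega), String.toList_ofList]
    · rw [if_neg (fun h => hc (hcond.mp h)), if_neg hc]
      exact ihM (by omega)

lemma portA_eq (text suffix : String) (ht : text ≠ "") (hsuf : suffix ≠ "")
    (hs : PySem.Str.lstrip suffix ≠ "") :
    remove_suffix_overlap_py text suffix =
      String.ofList (text.toList.take
        (text.toList.length - pvOv text.toList (PySem.Str.lstrip suffix).toList)) := by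
  have hguard : ¬(text = "" ∨ suffix = "") := not_or.mpr ⟨ht, hsuf⟩
  simp only [remove_suffix_overlap_py, if_neg hguard, if_neg hs]
  rw [PySem.Str.len_eq, PySem.Str.len_eq, ← Nat.cast_min]
  rw [pvALoop_eq text (PySem.Str.lstrip suffix)
    (min text.toList.length (PySem.Str.lstrip suffix).toList.length) (le_refl _)]
  rfl

-- ----- the sentinel: borders of sl ++ '\x00' :: tl are exactly the overlaps -----
lemma pvComb_border_iff (tl sl : List Char)
    (hsep_t : '\x00' ∉ tl) (hsep_s : '\x00' ∉ sl) (b : Nat)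
    (hb : b ≤ sl.length + tl.length) :
    pvIsB (sl ++ '\x00' :: tl) b ↔ (b ≤ min tl.length sl.length ∧ pvMatch tl sl b) := by
  have hslen : (sl ++ '\x00' :: tl).length = sl.length + 1 + tl.length := by
    simp only [List.length_append, List.length_cons]
    omega
  have hgetm : (sl ++ '\x00' :: tl)[sl.length]? = some '\x00' := by
    rw [List.getElem?_append_right (le_refl _)]
    simp
  have hne : ∀ i c, (sl ++ '\x00' :: tl)[i]? = some c → i ≠ sl.length → c ≠ '\x00' := by
    intro i c hc hi hcc
    subst hcc
    by_cases hlt : i < sl.length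
    · rw [List.getElem?_append_left hlt] at hc
      exact hsep_s (List.mem_of_getElem? hc)
    · rw [List.getElem?_append_right (by omega)] at hc
      rw [show i - sl.length = (i - sl.length - 1) + 1 by omega] at hc
      simp only [List.getElem?_cons_succ] at hc
      exact hsep_t (List.mem_of_getElem? hc)
  have hdropc : ∀ b', b' ≤ tl.length →
      (sl ++ '\x00' :: tl).drop ((sl ++ '\x00' :: tl).length - b') = tl.drop (tl.length - b') := by
    intro b' hb'
    rw [hslen, List.drop_append, List.drop_eq_nil_of_le (by omega),
      show sl.length + 1 + tl.length - b' - sl.length = (tl.length - b') + 1 by omega,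
      List.drop_succ_cons, List.nil_append]
  constructor
  · intro hB
    rcases Nat.eq_zero_or_pos b with hb0 | hbpos
    · subst hb0
      exact ⟨Nat.zero_le _, by simp [pvMatch]⟩
    have hbm : b ≤ sl.length := by
      by_contra hbm
      push Not at hbm
      have heq := congrArg (fun l => l[sl.length]?) hB
      simp only [List.getElem?_take, List.getElem?_drop] at heq
      rw [if_pos hbm, hgetm] at heq
      exact hne _ _ heq.symm (by omega) rfl
    have hbn : b ≤ tl.length := by
      by_contra hbn
      push Not at hbn
      have heq := congrArg (fun l => l[b - tl.length - 1]?) hB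
      simp only [List.getElem?_take, List.getElem?_drop] at heq
      rw [if_pos (by omega),
        show (sl ++ '\x00' :: tl).length - b + (b - tl.length - 1) = sl.length by
          rw [hslen]; omega, hgetm] at heq
      exact hne _ _ heq (by omega) rfl
    refine ⟨by omega, ?_⟩
    unfold pvIsB at hB
    rw [List.take_append_of_le_length hbm, hdropc b hbn] at hB
    exact hB.symm
  · rintro ⟨hbmin, hm⟩
    unfold pvIsB
    rw [List.take_append_of_le_length (by omega), hdropc b (by omega)]
    exact hm.symm

lemma pvBord_comb (tl sl : List Char)
    (hsep_t : '\x00' ∉ tl) (hsep_s : '\x00' ∉ sl) :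
    pvBord (sl ++ '\x00' :: tl) = pvOv tl sl := by
  have hslen : (sl ++ '\x00' :: tl).length = sl.length + 1 + tl.length := by
    simp only [List.length_append, List.length_cons]
    omega
  have hovle : pvOv tl sl ≤ min tl.length sl.length := Nat.findGreatest_le _
  apply pvBord_eq_of
  · rw [pvComb_border_iff tl sl hsep_t hsep_s _ (by omega)]
    exact ⟨hovle, Nat.findGreatest_spec (Nat.zero_le _) (by simp [pvMatch])⟩
  · omega
  · intro b hb hB
    obtain ⟨h1, h2⟩ := (pvComb_border_iff tl sl hsep_t hsep_s b (by omega)).mp hB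
    exact Nat.le_findGreatest h1 h2

lemma portB_eq (text suffix : String) (hs : PySem.Str.lstrip suffix ≠ "")
    (hsep_t : '\x00' ∉ text.toList) (hsep_s : '\x00' ∉ (PySem.Str.lstrip suffix).toList) :
    remove_suffix_overlap_py_alt text suffix =
      String.ofList (text.toList.take
        (text.toList.length - pvOv text.toList (PySem.Str.lstrip suffix).toList)) := by
  simp only [remove_suffix_overlap_py_alt, if_neg hs]
  have hL : 1 ≤ ((PySem.Str.lstrip suffix).toList ++ '\x00' :: text.toList).length := by
    simp only [List.length_append, List.length_cons]
    omega
  rw [pvKmp_fold _ hL, pvBord_comb text.toList (PySem.Str.lstrip suffix).toList hsep_t hsep_s]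
  have hovn : pvOv text.toList (PySem.Str.lstrip suffix).toList ≤ text.toList.length :=
    le_trans (Nat.findGreatest_le _) (min_le_left _ _)
  rw [PySem.Str.len_eq,
    show (text.toList.length : Int) - (pvOv text.toList (PySem.Str.lstrip suffix).toList : Int) =
      ((text.toList.length - pvOv text.toList (PySem.Str.lstrip suffix).toList : Nat) : Int) by omega]
  apply String.toList_inj.mp
  rw [PySem.Str.toList_slice, PySem.Chars.slice_eq_listSlice, PySem.List.slice_to_natCast,
    String.toList_ofList]

-- ===== VERDICT (by name: the statement is the Claim_ definition above) =====
theorem remove_suffix_overlap_py_spec : Claim_equal_remove_suffix_overlap_py := by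
  intro text suffix hdom
  unfold Spec_remove_suffix_overlap_py
  unfold Dom_remove_suffix_overlap_py at hdom
  rw [Bool.and_eq_true] at hdom
  obtain ⟨hd1, hd2⟩ := hdom
  have hsep_t : '\x00' ∉ text.toList := by
    intro hmem
    have h := List.all_eq_true.mp hd1 _ hmem
    exact absurd h (by decide)
  have hsep_s0 : '\x00' ∉ suffix.toList := by
    intro hmem
    have h := List.all_eq_true.mp hd2 _ hmem
    exact absurd h (by decide)
  by_cases hs : PySem.Str.lstrip suffix = ""
  · have hA : remove_suffix_overlap_py text suffix = text := by
      by_cases h1 : text = "" ∨ suffix = ""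
      · simp [remove_suffix_overlap_py, h1]
      · simp [remove_suffix_overlap_py, h1, hs]
    have hB : remove_suffix_overlap_py_alt text suffix = text := by
      simp [remove_suffix_overlap_py_alt, hs]
    rw [hA, hB]
  · have hsep_s : '\x00' ∉ (PySem.Str.lstrip suffix).toList := by
      intro hmem
      rw [PySem.Str.toList_lstrip] at hmem
      exact hsep_s0 ((List.dropWhile_sublist _).subset hmem)
    have hsuf : suffix ≠ "" := by
      intro h
      apply hs
      rw [h]
      decide
    rw [portB_eq text suffix hs hsep_t hsep_s]
    by_cases ht : text = ""
    · subst ht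
      have hA : remove_suffix_overlap_py "" suffix = "" := by
        simp [remove_suffix_overlap_py]
      rw [hA]
      simp
    · exact portA_eq text suffix ht hsuf hs
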